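-- pv_equiv track=rewrite | github.com/bytedance/FermiNet_with_ECP | ferminet_ecp/integral/quadrature.py | expand_sign
-- ===== SOURCE A (Python) =====
-- def expand_sign(l):
--     """
--      expand the set with signs,
--      example: [a,b,c] => [+/- a, +/- b, +/- c]
--
--     """
--     if len(l) == 1:
--         res = [[l[0]]]
--         if l[0] != 0:
--             res = res + [[-l[0]]]
--         return res
--     rests = expand_sign(l[1:])
--
--     res = [[l[0]] + s for s in rests]
--     if l[0] != 0:
--         res += [[-l[0]] + s for s in rests]
--     return res
-- ===== SOURCE B (Python) =====
-- def expand_sign(l):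
--     # Fold right-to-left: build all sign combinations with an accumulator,
--     # positive branch listed before negative, zeros contribute one choice.
--     res = [[]]
--     for x in reversed(l):
--         if x == 0:
--             res = [[x] + s for s in res]
--         else:
--             res = [[x] + s for s in res] + [[-x] + s for s in res]
--     return res
-- ===== Notes on version B (the rewrite author's own statement) =====
-- stated objective: simpler
-- what changed: Replaces the tail recursion (with a special-cased length-1 base) by a single right-to-left fold over an accumulator seeded with [[]].
-- outside the precondition, e.g. on expand_sign([]): A raises RecursionError, B returns [[]]
import Mathlib
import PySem

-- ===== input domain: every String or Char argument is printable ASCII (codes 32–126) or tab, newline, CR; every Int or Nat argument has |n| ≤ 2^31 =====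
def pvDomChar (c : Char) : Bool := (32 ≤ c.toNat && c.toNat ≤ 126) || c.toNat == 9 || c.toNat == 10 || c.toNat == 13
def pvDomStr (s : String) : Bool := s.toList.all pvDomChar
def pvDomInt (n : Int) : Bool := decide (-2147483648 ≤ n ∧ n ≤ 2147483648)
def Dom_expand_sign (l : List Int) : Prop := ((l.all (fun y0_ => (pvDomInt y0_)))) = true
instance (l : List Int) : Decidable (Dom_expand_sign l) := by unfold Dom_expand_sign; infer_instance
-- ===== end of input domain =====

-- B replaces A's tail recursion by a right-to-left fold over an accumulator (simpler decomposition, same cost);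
-- the empty list, on which A recurses forever, is excluded by Pre_.
-- ===== PORT A =====
-- Literal port of A's recursion: len==1 base case, recurse on the tail.
def expand_sign (l : List Int) : List (List Int) :=
  match l with
  | [] => []  -- Python diverges (infinite recursion) here; excluded by Pre_
  | [x] =>
      let res := [[x]]
      if x ≠ 0 then res ++ [[-x]] else res
  | x :: rest =>
      let rests := expand_sign rest
      let res := rests.map (fun s => x :: s)
      if x ≠ 0 then res ++ rests.map (fun s => -x :: s) else res

-- ===== PORT B =====
-- B: right-to-left fold over an accumulator seeded with [[]].
def expand_sign_alt (l : List Int) : List (List Int) :=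
  l.foldr
    (fun x res =>
      if x == 0 then res.map (fun s => x :: s)
      else res.map (fun s => x :: s) ++ res.map (fun s => -x :: s))
    [[]]

-- ===== PRECONDITION & SPEC =====
-- Pre_ excludes the empty list, on which Python A recurses forever (RecursionError).
def Pre_expand_sign (l : List Int) : Prop := l ≠ []
instance (l : List Int) : Decidable (Pre_expand_sign l) := by unfold Pre_expand_sign; infer_instance
def pvWitness_expand_sign : List Int := [1, 0, -2]
def Spec_expand_sign (l : List Int) (out : List (List Int)) : Prop := out = expand_sign_alt l
instance (l : List Int) (out : List (List Int)) : Decidable (Spec_expand_sign l out) := by unfold Spec_expand_sign; infer_instance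

-- ===== CLAIM (what is proved, stated in full; the proofs are below) =====
def Claim_equal_expand_sign : Prop := ∀ (l : List Int), Dom_expand_sign l → Pre_expand_sign l → Spec_expand_sign l (expand_sign l)

-- ===== LEMMAS AND PROOFS =====
theorem expand_sign_eq_alt (l : List Int) (h : l ≠ []) :
    expand_sign l = expand_sign_alt l := by
  induction l with
  | nil => exact absurd rfl h
  | cons x rest ih =>
    cases rest with
    | nil =>
      simp only [expand_sign, expand_sign_alt, List.foldr]
      by_cases hx : x = 0 <;> simp [hx]
    | cons y t =>
      have ih' := ih (by simp)
      simp only [expand_sign, expand_sign_alt, List.foldr] at ih' ⊢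
      rw [ih']
      by_cases hx : x = 0 <;> simp [hx]

-- ===== VERDICT (by name: the statement is the Claim_ definition above) =====
theorem expand_sign_spec : Claim_equal_expand_sign := by
  intro l _ hpre
  exact expand_sign_eq_alt l hpre
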